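-- pv_equiv track=rewrite | github.com/Fare-spec/cours | programmation_dynamique/piece.py | machine_bruteforce
-- ===== SOURCE A (Python) =====
-- def machine_bruteforce(price, enter, money_allowed):
--     assert (
--         enter >= price
--     ), "The entered amount must be greater than or equal to the price"
--     change = enter - price
--     if change == 0:
--         return [[]]
--
--     results = []
--
--     def brute(current_combination, total):
--         if total == change:
--             results.append(current_combination.copy())
--             return
--         if total > change:
--             return
--
--         for coin in money_allowed:
--             current_combination.append(coin)
--             brute(current_combination, total + coin)
--             current_combination.pop()
--
--     brute([], 0)
--     return results
-- ===== SOURCE B (Python) =====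
-- def machine_bruteforce(price, enter, money_allowed):
--     assert (
--         enter >= price
--     ), "The entered amount must be greater than or equal to the price"
--     change = enter - price
--     # Bottom-up DP: table[r] lists, in A's DFS preorder, every ordered coin
--     # sequence summing to r (first coin in money_allowed order, then recursively).
--     table = [[[]]]
--     for r in range(1, change + 1):
--         row = []
--         for coin in money_allowed:
--             if coin <= r:
--                 row.extend([coin] + s for s in table[r - coin])
--         table.append(row)
--     return table[change]
-- ===== Notes on version B (the rewrite author's own statement) =====
-- stated objective: alternative
-- what changed: Replaces the recursive DFS backtracking over a shared mutable combination with a bottom-up dynamic-programming table table[r] of all ordered coin sequences summing to r, built once from 0 up to change; subtrees for equal remaining amounts are computed once instead of re-explored.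
import Mathlib
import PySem

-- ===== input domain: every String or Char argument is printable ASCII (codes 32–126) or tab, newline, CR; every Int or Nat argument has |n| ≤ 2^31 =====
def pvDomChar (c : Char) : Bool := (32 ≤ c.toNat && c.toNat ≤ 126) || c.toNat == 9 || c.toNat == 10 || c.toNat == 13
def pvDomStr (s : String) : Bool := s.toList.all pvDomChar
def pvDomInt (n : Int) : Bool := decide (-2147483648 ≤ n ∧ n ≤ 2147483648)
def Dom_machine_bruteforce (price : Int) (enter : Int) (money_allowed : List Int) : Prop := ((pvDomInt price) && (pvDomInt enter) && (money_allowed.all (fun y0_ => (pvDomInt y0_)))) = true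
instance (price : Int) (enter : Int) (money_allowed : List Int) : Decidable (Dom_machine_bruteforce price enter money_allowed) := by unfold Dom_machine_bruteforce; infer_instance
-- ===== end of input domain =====

-- B replaces A's recursive DFS backtracking with a bottom-up DP table of all
-- ordered coin sequences for each amount 0..change (objective: alternative).

-- ===== PORT A =====
-- A's inner `brute` recursion, with a fuel counter making it total;
-- under Pre_ (all coins positive) fuel = change.toNat + 1 is never exhausted.
def bruteA (change : Int) (coins : List Int) :
    Nat → List Int → Int → List (List Int) → List (List Int)
  | 0, _, _, results => results
  | fuel+1, cur, total, results =>
    if total = change then results ++ [cur]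
    else if change < total then results
    else coins.foldl
      (fun res coin => bruteA change coins fuel (cur ++ [coin]) (total + coin) res)
      results

def machine_bruteforce (price : Int) (enter : Int) (money_allowed : List Int) : List (List Int) :=
  let change := enter - price
  if change = 0 then [[]]
  else bruteA change money_allowed (change.toNat + 1) [] 0 []

-- ===== PORT B =====
-- Python's `table[r - coin]` is `getD … []`; under Pre_ the index is always
-- in range (1 ≤ coin ≤ r), so the default is never used and the port is exact.
def dpRow (coins : List Int) (table : List (List (List Int))) (r : Int) : List (List Int) :=
  coins.foldl
    (fun row coin =>
      if coin ≤ r then row ++ (table.getD (r - coin).toNat []).map (fun s => coin :: s)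
      else row)
    []

def machine_bruteforce_alt (price : Int) (enter : Int) (money_allowed : List Int) : List (List Int) :=
  let change := enter - price
  let table := (PySem.List.pyRange 1 (change + 1) 1).foldl
      (fun table r => table ++ [dpRow money_allowed table r]) [[[]]]
  table.getD change.toNat []

-- ===== PRECONDITION & SPEC =====
-- Pre_ excludes exactly the inputs where A raises: enter < price (AssertionError),
-- and a nonpositive coin with change > 0 (unbounded recursion, RecursionError).
def Pre_machine_bruteforce (price : Int) (enter : Int) (money_allowed : List Int) : Prop :=
  price ≤ enter ∧ (enter - price = 0 ∨ ∀ c ∈ money_allowed, 0 < c)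
instance (price : Int) (enter : Int) (money_allowed : List Int) : Decidable (Pre_machine_bruteforce price enter money_allowed) := by unfold Pre_machine_bruteforce; infer_instance

def pvWitness_machine_bruteforce : Int × Int × List Int := (3, 7, [1, 2])

def Spec_machine_bruteforce (price : Int) (enter : Int) (money_allowed : List Int) (out : List (List Int)) : Prop := out = machine_bruteforce_alt price enter money_allowed
instance (price : Int) (enter : Int) (money_allowed : List Int) (out : List (List Int)) : Decidable (Spec_machine_bruteforce price enter money_allowed out) := by unfold Spec_machine_bruteforce; infer_instance

-- ===== CLAIM (what is proved, stated in full; the proofs are below) =====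
def Claim_equal_machine_bruteforce : Prop := ∀ (price : Int) (enter : Int) (money_allowed : List Int), Dom_machine_bruteforce price enter money_allowed → Pre_machine_bruteforce price enter money_allowed → Spec_machine_bruteforce price enter money_allowed (machine_bruteforce price enter money_allowed)

-- ===== LEMMAS AND PROOFS =====

-- the DP table after the first n loop iterations
def tableN (coins : List Int) : Nat → List (List (List Int))
  | 0 => [[[]]]
  | n+1 => tableN coins n ++ [dpRow coins (tableN coins n) ((n : Int) + 1)]

-- S coins r = table[r] : all ordered coin sequences summing to r, in DFS preorder
def S (coins : List Int) (r : Nat) : List (List Int) := (tableN coins r).getD r []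

theorem length_tableN (coins : List Int) (n : Nat) : (tableN coins n).length = n + 1 := by
  induction n with
  | zero => rfl
  | succ n ih => simp [tableN, ih]

theorem getD_tableN (coins : List Int) {r n : Nat} (h : r ≤ n) :
    (tableN coins n).getD r [] = S coins r := by
  induction n with
  | zero => interval_cases r; rfl
  | succ n ih =>
    rcases Nat.lt_or_ge r (n+1) with h' | h'
    · rw [← ih (Nat.lt_succ_iff.mp h')]
      have hr : r < (tableN coins n).length := by rw [length_tableN]; omega
      simp [tableN, List.getD, List.getElem?_append_left hr]
    · have : r = n + 1 := by omega
      subst this; rfl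

theorem S_zero (coins : List Int) : S coins 0 = [[]] := rfl

theorem S_succ (coins : List Int) (hpos : ∀ c ∈ coins, 0 < c) (n : Nat) :
    S coins (n+1) = coins.foldl
      (fun row coin =>
        if coin ≤ (n : Int) + 1 then
          row ++ (S coins (((n : Int) + 1 - coin).toNat)).map (fun s => coin :: s)
        else row) [] := by
  have h1 : S coins (n+1) = dpRow coins (tableN coins n) ((n : Int) + 1) := by
    have hl : (tableN coins n).length = n + 1 := length_tableN coins n
    simp [S, tableN, List.getD, hl]
  rw [h1, dpRow]
  apply PySem.List.foldl_congr_mem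
  intro row coin hmem
  have hcpos : 0 < coin := hpos coin hmem
  by_cases hc : coin ≤ (n : Int) + 1
  · simp only [if_pos hc]
    rw [getD_tableN coins (by omega)]
  · simp [hc]

theorem brute_eq (coins : List Int) (hc : ∀ c ∈ coins, 0 < c) (change : Int) :
    ∀ (fuel : Nat) (total : Int), total ≤ change → (change - total).toNat < fuel →
    ∀ (cur : List Int) (results : List (List Int)),
    bruteA change coins fuel cur total results
      = results ++ (S coins (change - total).toNat).map (fun s => cur ++ s) := by
  intro fuel
  induction fuel with
  | zero => intro total _ h; omega
  | succ fuel ih =>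
    intro total htot hfuel cur results
    by_cases heq : total = change
    · subst heq
      simp [bruteA, S_zero]
    · have hlt : total < change := lt_of_le_of_ne htot heq
      have hne : ¬ change < total := by omega
      rw [bruteA, if_neg heq, if_neg hne]
      obtain ⟨n, hn⟩ : ∃ n : Nat, (change - total).toNat = n + 1 := ⟨(change - total).toNat - 1, by omega⟩
      rw [hn, S_succ coins hc]
      have hrow : ∀ cs : List Int, (∀ c ∈ cs, 0 < c) → ∀ row : List (List Int),
          cs.foldl (fun res coin => bruteA change coins fuel (cur ++ [coin]) (total + coin) res)
            (results ++ row.map (fun s => cur ++ s))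
          = results ++ (cs.foldl
              (fun row coin =>
                if coin ≤ (n : Int) + 1 then
                  row ++ (S coins (((n : Int) + 1 - coin).toNat)).map (fun s => coin :: s)
                else row) row).map (fun s => cur ++ s) := by
        intro cs
        induction cs with
        | nil => intro _ row; simp
        | cons c cs ihc =>
          intro hcs row
          have hcpos : 0 < c := hcs c (List.mem_cons_self ..)
          simp only [List.foldl_cons]
          by_cases hle : c ≤ (n : Int) + 1
          · have htc : total + c ≤ change := by omega
            have hfc : (change - (total + c)).toNat < fuel := by omega
            rw [ih (total + c) htc hfc (cur ++ [c]) (results ++ row.map (fun s => cur ++ s))]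
            have hidx : (change - (total + c)).toNat = ((n : Int) + 1 - c).toNat := by omega
            rw [hidx, if_pos hle]
            have : (S coins (((n : Int) + 1 - c).toNat)).map (fun s => (cur ++ [c]) ++ s)
                = ((S coins (((n : Int) + 1 - c).toNat)).map (fun s => c :: s)).map (fun s => cur ++ s) := by
              simp
            rw [this, List.append_assoc, ← List.map_append]
            exact ihc (fun x hx => hcs x (List.mem_cons_of_mem _ hx)) _
          · -- coin overshoots: total + c > change, recursion returns immediately
            have hover : change < total + c := by omega
            have hstop : bruteA change coins fuel (cur ++ [c]) (total + c)
                (results ++ row.map (fun s => cur ++ s))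
                = results ++ row.map (fun s => cur ++ s) := by
              cases fuel with
              | zero => rfl
              | succ f =>
                rw [bruteA, if_neg (by omega), if_pos hover]
            rw [hstop, if_neg hle]
            exact ihc (fun x hx => hcs x (List.mem_cons_of_mem _ hx)) _
      have := hrow coins hc []
      simpa using this

theorem alt_table (coins : List Int) (m : Nat) :
    (PySem.List.pyRange 1 ((m : Int) + 1) 1).foldl
      (fun table r => table ++ [dpRow coins table r]) [[[]]] = tableN coins m := by
  induction m with
  | zero => simp [PySem.List.pyRange_one_eq_nil, tableN]
  | succ m ih =>
    have hsplit : PySem.List.pyRange 1 ((m : Int) + 1 + 1) 1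
        = PySem.List.pyRange 1 ((m : Int) + 1) 1 ++ [(m : Int) + 1] := by
      have := PySem.List.pyRange_one_succ_right (a := 1) (b := (m : Int) + 1) (by omega)
      simpa using this
    simp only [Nat.cast_add, Nat.cast_one]
    rw [hsplit, List.foldl_append, ih]
    simp [tableN]

theorem alt_eq_S (price enter : Int) (coins : List Int) (h0 : 0 ≤ enter - price) :
    machine_bruteforce_alt price enter coins = S coins (enter - price).toNat := by
  have hm : enter - price = ((enter - price).toNat : Int) := by omega
  show ((PySem.List.pyRange 1 ((enter - price) + 1) 1).foldl
      (fun table r => table ++ [dpRow coins table r]) [[[]]]).getD (enter - price).toNat [] = _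
  rw [hm, alt_table coins (enter - price).toNat]
  simp only [Int.toNat_natCast]
  rfl

-- ===== VERDICT (by name: the statement is the Claim_ definition above) =====
theorem machine_bruteforce_spec : Claim_equal_machine_bruteforce := by
  intro price enter coins _ hpre
  obtain ⟨hle, hrest⟩ := hpre
  unfold Spec_machine_bruteforce machine_bruteforce
  have h0 : 0 ≤ enter - price := by omega
  rw [alt_eq_S price enter coins h0]
  by_cases hz : enter - price = 0
  · simp only [hz]
    norm_num [S_zero]
  · simp only [if_neg hz]
    have hcpos : ∀ c ∈ coins, 0 < c := by
      rcases hrest with h | h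
      · exact absurd h hz
      · exact h
    have hfuel : (enter - price - 0).toNat < (enter - price).toNat + 1 := by omega
    rw [brute_eq coins hcpos (enter - price) ((enter - price).toNat + 1) 0 h0 hfuel [] []]
    simp
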